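-- pv_equiv track=rewrite | github.com/pangjeffa/adventcode2023 | day02/solution.py | checkRGB
-- ===== SOURCE A (Python) =====
-- def checkRGB(s:str,limits:tuple) ->bool:
--     '''
--         "12 blue, 15 red, 2 green; 17 red, 8 green, 5 blue; 8 red, 17 blue; 9 green, 1 blue, 4 red"
--     '''
--     lines = s.replace(';',',').split(",")
--     r,g,b = limits
--     for line in lines:
--
--         count, color = line.strip().split(' ')
--         if color == 'blue' and int(count) > b:
--             return False
--         if color == 'red'and int(count) > r:
--             return False
--         if color == 'green' and int(count) > g:
--             return False
--     return True
-- ===== SOURCE B (Python) =====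
-- def checkRGB(s: str, limits: tuple) -> bool:
--     r, g, b = limits
--     maxes = {}
--     for line in s.replace(';', ',').split(','):
--         count, color = line.strip().split(' ')
--         if color in ('red', 'green', 'blue'):
--             n = int(count)
--             maxes[color] = max(maxes.get(color, n), n)
--     return all(maxes.get(c, lim) <= lim for c, lim in (('red', r), ('green', g), ('blue', b)))
-- ===== Notes on version B (the rewrite author's own statement) =====
-- stated objective: simpler
-- what changed: B replaces A's early-return per-draw limit checks with one pass that accumulates per-color maxima into a dict and a single final comparison of the three maxima against the limits.
-- outside the precondition, e.g. on checkRGB('3 blue, oops', (1, 1, 1)): A returns False, B raises ValueError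
import Mathlib
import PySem

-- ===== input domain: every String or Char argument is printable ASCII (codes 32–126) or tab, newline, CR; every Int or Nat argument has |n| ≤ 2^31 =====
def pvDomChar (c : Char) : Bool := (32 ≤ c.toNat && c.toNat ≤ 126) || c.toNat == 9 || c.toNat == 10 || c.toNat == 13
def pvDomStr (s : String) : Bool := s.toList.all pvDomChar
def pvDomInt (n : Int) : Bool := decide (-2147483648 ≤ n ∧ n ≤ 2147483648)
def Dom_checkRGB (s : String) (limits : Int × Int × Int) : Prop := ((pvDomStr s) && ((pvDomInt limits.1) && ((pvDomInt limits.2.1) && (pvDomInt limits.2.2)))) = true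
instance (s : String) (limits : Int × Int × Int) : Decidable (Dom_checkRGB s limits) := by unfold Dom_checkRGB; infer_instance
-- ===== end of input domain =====

-- B replaces A's early-return per-draw limit checks with one pass accumulating per-color maxima
-- into a dict, compared once against the limits at the end (objective: simpler).

-- shared parsing helpers (both Pythons parse the draws identically)
def pvLines (s : String) : List String :=
  (PySem.Str.split? (PySem.Str.replace s ";" ",") ",").getD []

def pvParse (line : String) : List String :=
  (PySem.Str.split? (PySem.Str.strip line) " ").getD []

-- ===== PORT A =====
def checkRGBGo (r g b : Int) : List String → Bool
  | [] => true
  | line :: rest =>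
    match pvParse line with
    | [count, color] =>
      if color == "blue" && (PySem.Int.ofStr? count).getD 0 > b then false
      else if color == "red" && (PySem.Int.ofStr? count).getD 0 > r then false
      else if color == "green" && (PySem.Int.ofStr? count).getD 0 > g then false
      else checkRGBGo r g b rest
    | _ => false  -- Python raises ValueError here (excluded by Pre_)

def checkRGB (s : String) (limits : Int × Int × Int) : Bool :=
  checkRGBGo limits.1 limits.2.1 limits.2.2 (pvLines s)

-- ===== PORT B =====
def altStep (d : PySem.Dict String Int) (line : String) : PySem.Dict String Int :=
  match pvParse line with
  | [count, color] =>
    if color == "red" || color == "green" || color == "blue" then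
      let n := (PySem.Int.ofStr? count).getD 0
      d.insert color (max (d.getD color n) n)
    else d
  | _ => d  -- Python raises ValueError here (excluded by Pre_)

def checkRGB_alt (s : String) (limits : Int × Int × Int) : Bool :=
  let maxes := (pvLines s).foldl altStep PySem.Dict.empty
  [("red", limits.1), ("green", limits.2.1), ("blue", limits.2.2)].all
    (fun p => maxes.getD p.1 p.2 ≤ p.2)

-- ===== PRECONDITION & SPEC =====
-- Pre_ excludes inputs where some draw does not parse as 'count color' (with an int count when the
-- color is red/green/blue): there Python raises ValueError — except that A's early False return can
-- fire before a malformed later draw, returning False where B still raises.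
def pvLineOK (line : String) : Bool :=
  match pvParse line with
  | [count, color] =>
    !(color == "blue" || color == "red" || color == "green") || (PySem.Int.ofStr? count).isSome
  | _ => false

def Pre_checkRGB (s : String) (limits : Int × Int × Int) : Prop :=
  (pvLines s).all pvLineOK = true

instance (s : String) (limits : Int × Int × Int) : Decidable (Pre_checkRGB s limits) := by
  unfold Pre_checkRGB; infer_instance

def pvWitness_checkRGB : String × (Int × Int × Int) :=
  ("12 blue, 15 red, 2 green; 17 red, 8 green, 5 blue", (20, 20, 20))

def Spec_checkRGB (s : String) (limits : Int × Int × Int) (out : Bool) : Prop := out = checkRGB_alt s limits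
instance (s : String) (limits : Int × Int × Int) (out : Bool) : Decidable (Spec_checkRGB s limits out) := by unfold Spec_checkRGB; infer_instance

-- ===== CLAIM (what is proved, stated in full; the proofs are below) =====
def Claim_equal_checkRGB : Prop := ∀ (s : String) (limits : Int × Int × Int), Dom_checkRGB s limits → Pre_checkRGB s limits → Spec_checkRGB s limits (checkRGB s limits)

-- ===== LEMMAS AND PROOFS =====

/-- the count a line contributes to color `c` (none if it is another color or malformed) -/
def countOf (c : String) (line : String) : Option Int :=
  match pvParse line with
  | [count, color] => if color = c then some ((PySem.Int.ofStr? count).getD 0) else none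
  | _ => none

def counts (c : String) (lines : List String) : List Int := lines.filterMap (countOf c)

def optmax (o : Option Int) (n : Int) : Int := match o with | none => n | some m => max m n

/-- A's early-return loop answers: no line of any known color exceeds its limit. -/
lemma checkRGBGo_char (r g b : Int) :
    ∀ lines : List String, (∀ l ∈ lines, pvLineOK l = true) →
    checkRGBGo r g b lines =
      (!(counts "blue" lines).any (fun n => decide (b < n)) &&
       !(counts "red" lines).any (fun n => decide (r < n)) &&
       !(counts "green" lines).any (fun n => decide (g < n))) := by
  intro lines
  induction lines with
  | nil => intro _; simp [checkRGBGo, counts]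
  | cons line rest ih =>
    intro h
    have hline := h line (by simp)
    have hrest : ∀ l ∈ rest, pvLineOK l = true := fun l hl => h l (by simp [hl])
    have ihr := ih hrest
    unfold pvLineOK at hline
    cases hp : pvParse line with
    | nil => rw [hp] at hline; simp at hline
    | cons count t =>
      cases t with
      | nil => rw [hp] at hline; simp at hline
      | cons color t2 =>
        cases t2 with
        | cons _ _ => rw [hp] at hline; simp at hline
        | nil =>
          have hco : ∀ c : String,
              countOf c line = if color = c then some ((PySem.Int.ofStr? count).getD 0) else none := by
            intro c; unfold countOf; rw [hp]
          simp only [checkRGBGo, hp]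
          by_cases hb : color = "blue"
          · subst hb
            by_cases hex : b < (PySem.Int.ofStr? count).getD 0
            · simp [hex, counts, hco]
            · simp [hex, counts, hco, ihr]
          · by_cases hr : color = "red"
            · subst hr
              by_cases hex : r < (PySem.Int.ofStr? count).getD 0
              · simp [hex, counts, hco]
              · simp [hex, counts, hco, ihr]
            · by_cases hg : color = "green"
              · subst hg
                by_cases hex : g < (PySem.Int.ofStr? count).getD 0
                · simp [hex, counts, hco, hb, hr]
                · simp [hex, counts, hco, hb, hr, ihr]
              · simp [counts, List.filterMap_cons, hco, hb, hr, hg, ihr]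

/-- B's fold keeps, per known color, the running max of its counts (as an Option starting at get?). -/
lemma fold_get? (c : String) (hc : c = "red" ∨ c = "green" ∨ c = "blue") :
    ∀ (lines : List String) (d : PySem.Dict String Int),
    (lines.foldl altStep d).get? c =
      (counts c lines).foldl (fun o n => some (optmax o n)) (d.get? c) := by
  intro lines
  induction lines with
  | nil => intro d; simp [counts]
  | cons line rest ih =>
    intro d
    simp only [List.foldl_cons]
    cases hp : pvParse line with
    | nil =>
      have hstep : altStep d line = d := by simp [altStep, hp]
      have hco : countOf c line = none := by simp [countOf, hp]
      simpa [hstep, counts, hco] using ih d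
    | cons count t =>
      cases t with
      | nil =>
        have hstep : altStep d line = d := by simp [altStep, hp]
        have hco : countOf c line = none := by simp [countOf, hp]
        simpa [hstep, counts, hco] using ih d
      | cons color t2 =>
        cases t2 with
        | cons _ _ =>
          have hstep : altStep d line = d := by simp [altStep, hp]
          have hco : countOf c line = none := by simp [countOf, hp]
          simpa [hstep, counts, hco] using ih d
        | nil =>
          have hco : ∀ c' : String,
              countOf c' line = if color = c' then some ((PySem.Int.ofStr? count).getD 0) else none := by
            intro c'; unfold countOf; rw [hp]
          by_cases hk : color = "red" ∨ color = "green" ∨ color = "blue"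
          · have hkb : (color == "red" || color == "green" || color == "blue") = true := by
              rcases hk with h | h | h <;> simp [h]
            have hstep : altStep d line
                = d.insert color (max (d.getD color ((PySem.Int.ofStr? count).getD 0)) ((PySem.Int.ofStr? count).getD 0)) := by
              simp [altStep, hp, hkb]
            rw [hstep]
            by_cases hec : color = c
            · subst hec
              rw [ih]
              have hins : (d.insert color (max (d.getD color ((PySem.Int.ofStr? count).getD 0)) ((PySem.Int.ofStr? count).getD 0))).get? color
                  = some (optmax (d.get? color) ((PySem.Int.ofStr? count).getD 0)) := by
                rw [PySem.Dict.get?_insert_self]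
                cases hg : d.get? color with
                | none => simp [optmax, PySem.Dict.getD_eq_get?_getD, hg]
                | some m => simp [optmax, PySem.Dict.getD_eq_get?_getD, hg]
              simp [hins, counts, hco]
            · rw [ih, PySem.Dict.get?_insert]
              simp [Ne.symm hec, counts, hco, hec]
          · have hkb : (color == "red" || color == "green" || color == "blue") = false := by
              simp only [Bool.or_eq_false_iff, beq_eq_false_iff_ne]
              exact ⟨⟨fun h => hk (Or.inl h), fun h => hk (Or.inr (Or.inl h))⟩,
                     fun h => hk (Or.inr (Or.inr h))⟩
            have hstep : altStep d line = d := by simp [altStep, hp, hkb]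
            have hec : color ≠ c := by rintro rfl; exact hk hc
            simpa [hstep, counts, hco, hec] using ih d

/-- the running-max accumulator stays ≤ lim iff it started ≤ lim and no element exceeds lim -/
lemma optfold_le (lim : Int) :
    ∀ (l : List Int) (o : Option Int),
    decide ((l.foldl (fun o n => some (optmax o n)) o).getD lim ≤ lim)
      = (decide (o.getD lim ≤ lim) && !l.any (fun n => decide (lim < n))) := by
  intro l
  induction l with
  | nil => intro o; simp
  | cons n t ih =>
    intro o
    rw [List.foldl_cons, List.any_cons, ih (some (optmax o n))]
    have hstep : decide (optmax o n ≤ lim) = (decide (o.getD lim ≤ lim) && !decide (lim < n)) := by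
      cases o with
      | none =>
        simp only [optmax, Option.getD_none]
        by_cases h : lim < n
        · simp [h, show ¬ n ≤ lim by omega]
        · simp [h, show n ≤ lim by omega]
      | some m =>
        simp only [optmax, Option.getD_some]
        by_cases h : lim < n
        · simp [h, show ¬ max m n ≤ lim by omega]
        · by_cases h2 : m ≤ lim
          · simp [h, h2, show max m n ≤ lim by omega]
          · simp [h, h2, show ¬ max m n ≤ lim by omega]
    rw [Option.getD_some, hstep]
    cases h1 : decide (o.getD lim ≤ lim) <;> cases h2 : decide (lim < n) <;>
      cases h3 : t.any (fun n => decide (lim < n)) <;> rfl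

lemma alt_char (s : String) (r g b : Int) :
    checkRGB_alt s (r, g, b) =
      (!(counts "red" (pvLines s)).any (fun n => decide (r < n)) &&
       !(counts "green" (pvLines s)).any (fun n => decide (g < n)) &&
       !(counts "blue" (pvLines s)).any (fun n => decide (b < n))) := by
  unfold checkRGB_alt
  simp only [List.all_cons, List.all_nil, Bool.and_true]
  have key : ∀ (c : String) (lim : Int), (c = "red" ∨ c = "green" ∨ c = "blue") →
      decide (((pvLines s).foldl altStep PySem.Dict.empty).getD c lim ≤ lim)
        = !(counts c (pvLines s)).any (fun n => decide (lim < n)) := by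
    intro c lim hc
    rw [PySem.Dict.getD_eq_get?_getD, fold_get? c hc (pvLines s) PySem.Dict.empty,
        PySem.Dict.get?_empty, optfold_le]
    simp
  rw [key "red" r (Or.inl rfl), key "green" g (Or.inr (Or.inl rfl)),
      key "blue" b (Or.inr (Or.inr rfl)), Bool.and_assoc]

-- ===== VERDICT (by name: the statement is the Claim_ definition above) =====
theorem checkRGB_spec : Claim_equal_checkRGB := by
  intro s limits _hdom hpre
  obtain ⟨r, g, b⟩ := limits
  unfold Spec_checkRGB
  unfold Pre_checkRGB at hpre
  rw [List.all_eq_true] at hpre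
  unfold checkRGB
  rw [checkRGBGo_char r g b (pvLines s) (fun l hl => hpre l hl), alt_char s r g b]
  generalize (counts "red" (pvLines s)).any (fun n => decide (r < n)) = x
  generalize (counts "green" (pvLines s)).any (fun n => decide (g < n)) = y
  generalize (counts "blue" (pvLines s)).any (fun n => decide (b < n)) = z
  cases x <;> cases y <;> cases z <;> rfl
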